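-- pv_equiv track=rewrite | github.com/pypi-data/pypi-mirror-134 | packages/darkhex/darkhex-0.0.1-py3-none-any.whl/darkhex/algorithms/tree_generator.py | tree_info_string
-- ===== SOURCE A (Python) =====
-- def tree_info_string(info_state):
--     """
--     Converts the info_state to a string.
--     """
--     info_state_str = ""
--     line_num = 1
--     for cell in info_state:
--         if cell == " ":
--             info_state_str += "\n"
--         elif cell == "\n":
--             # add \n and spaces amount of the row number
--             info_state_str += "\n" + " " * line_num
--             line_num += 1
--         else:
--             info_state_str += cell + " "
--     # info_state_str += '\n' + ' ' * line_num + info_state[:2]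
--     return info_state_str
-- ===== SOURCE B (Python) =====
-- def tree_info_string(info_state):
--     """
--     Converts the info_state to a string.
--     """
--     segments = info_state.split("\n")
--     transformed = ["".join("\n" if c == " " else c + " " for c in seg)
--                    for seg in segments]
--     parts = [transformed[0]]
--     for k in range(1, len(transformed)):
--         parts.append("\n" + " " * k)
--         parts.append(transformed[k])
--     return "".join(parts)
-- ===== Notes on version B (the rewrite author's own statement) =====
-- stated objective: alternative
-- what changed: Replaces A's single character loop carrying a mutable line counter by a split-on-newline decomposition: each segment is transformed independently (space -> newline, other char -> char + space) and the segments are joined with separators of growing indentation, the counter becoming the join index.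
import Mathlib
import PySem

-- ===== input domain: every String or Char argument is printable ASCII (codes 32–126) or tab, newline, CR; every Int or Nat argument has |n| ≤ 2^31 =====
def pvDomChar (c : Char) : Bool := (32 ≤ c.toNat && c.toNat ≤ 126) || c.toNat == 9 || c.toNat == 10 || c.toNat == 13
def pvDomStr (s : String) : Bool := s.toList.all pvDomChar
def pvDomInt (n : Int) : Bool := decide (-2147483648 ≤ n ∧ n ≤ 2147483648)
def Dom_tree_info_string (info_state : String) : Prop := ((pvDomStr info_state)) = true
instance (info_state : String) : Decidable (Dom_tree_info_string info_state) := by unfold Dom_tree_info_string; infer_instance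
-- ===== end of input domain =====

-- B joins per-segment transforms with growing indentation instead of A's single
-- char loop with a mutable line counter; alternative decomposition, same result.

-- ===== PORT A =====
-- A's for-loop over the characters, accumulator = (output so far, line_num)
def pvLoopA : List Char → List Char → Nat → List Char
  | [], acc, _ => acc
  | c :: cs, acc, n =>
    if c = ' ' then pvLoopA cs (acc ++ ['\n']) n
    else if c = '\n' then pvLoopA cs (acc ++ '\n' :: List.replicate n ' ') (n + 1)
    else pvLoopA cs (acc ++ [c, ' ']) n

def tree_info_string (info_state : String) : String :=
  String.ofList (pvLoopA info_state.toList [] 1)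

-- ===== PORT B =====
-- hand port of str.split("\n") for the single separator '\n' (exact: Python's
-- split on a one-char separator cuts at every '\n', keeping empty pieces)
def pvSplitNl : List Char → List (List Char)
  | [] => [[]]
  | c :: cs =>
    if c = '\n' then [] :: pvSplitNl cs
    else
      match pvSplitNl cs with
      | s :: ss => (c :: s) :: ss
      | [] => [[c]]

-- the per-segment transform: "".join("\n" if c == " " else c + " " for c in seg)
def pvSegTrans (seg : List Char) : List Char :=
  seg.flatMap (fun c => if c = ' ' then ['\n'] else [c, ' '])

-- the join with growing separator "\n" + " " * k, k = 1, 2, …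
def pvJoinGrow : Nat → List (List Char) → List Char
  | _, [] => []
  | _, [t] => t
  | k, t :: ts => t ++ ('\n' :: List.replicate k ' ') ++ pvJoinGrow (k + 1) ts

def tree_info_string_alt (info_state : String) : String :=
  String.ofList (pvJoinGrow 1 ((pvSplitNl info_state.toList).map pvSegTrans))

-- ===== PRECONDITION & SPEC =====
def Spec_tree_info_string (info_state : String) (out : String) : Prop := out = tree_info_string_alt info_state
instance (info_state : String) (out : String) : Decidable (Spec_tree_info_string info_state out) := by unfold Spec_tree_info_string; infer_instance

-- ===== CLAIM (what is proved, stated in full; the proofs are below) =====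
def Claim_equal_tree_info_string : Prop := ∀ (info_state : String), Dom_tree_info_string info_state → Spec_tree_info_string info_state (tree_info_string info_state)

-- ===== LEMMAS AND PROOFS =====

theorem pvSplitNl_ne_nil (cs : List Char) : pvSplitNl cs ≠ [] := by
  cases cs with
  | nil => simp [pvSplitNl]
  | cons c cs =>
    simp only [pvSplitNl]
    split_ifs
    · simp
    · cases h : pvSplitNl cs <;> simp

theorem pvJoinGrow_prepend (k : Nat) (u t : List Char) (ts : List (List Char)) :
    pvJoinGrow k ((u ++ t) :: ts) = u ++ pvJoinGrow k (t :: ts) := by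
  cases ts <;> simp [pvJoinGrow]

-- loop invariant: A's loop from state (acc, n) produces acc followed by B's
-- join-with-growing-indent of the remaining characters, starting at indent n
theorem pvLoopA_eq (cs : List Char) : ∀ (acc : List Char) (n : Nat),
    pvLoopA cs acc n = acc ++ pvJoinGrow n ((pvSplitNl cs).map pvSegTrans) := by
  induction cs with
  | nil => intro acc n; simp [pvLoopA, pvSplitNl, pvSegTrans, pvJoinGrow]
  | cons c cs ih =>
    intro acc n
    by_cases hsp : c = ' '
    · subst hsp
      obtain ⟨s, ss, hs⟩ : ∃ s ss, pvSplitNl cs = s :: ss := by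
        cases h : pvSplitNl cs with
        | nil => exact absurd h (pvSplitNl_ne_nil cs)
        | cons s ss => exact ⟨s, ss, rfl⟩
      have hsplit : pvSplitNl (' ' :: cs) = (' ' :: s) :: ss := by
        simp [pvSplitNl, hs]
      rw [pvLoopA, if_pos rfl, ih, hsplit]
      have : pvSegTrans (' ' :: s) = ['\n'] ++ pvSegTrans s := by
        simp [pvSegTrans]
      simp only [List.map_cons, this, pvJoinGrow_prepend, hs]
      simp
    · by_cases hnl : c = '\n'
      · subst hnl
        have hsplit : pvSplitNl ('\n' :: cs) = [] :: pvSplitNl cs := by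
          simp [pvSplitNl]
        obtain ⟨s, ss, hs⟩ : ∃ s ss, pvSplitNl cs = s :: ss := by
          cases h : pvSplitNl cs with
          | nil => exact absurd h (pvSplitNl_ne_nil cs)
          | cons s ss => exact ⟨s, ss, rfl⟩
        rw [pvLoopA, if_neg (by decide), if_pos rfl, ih, hsplit, hs]
        simp [pvJoinGrow, pvSegTrans]
      · obtain ⟨s, ss, hs⟩ : ∃ s ss, pvSplitNl cs = s :: ss := by
          cases h : pvSplitNl cs with
          | nil => exact absurd h (pvSplitNl_ne_nil cs)
          | cons s ss => exact ⟨s, ss, rfl⟩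
        have hsplit : pvSplitNl (c :: cs) = (c :: s) :: ss := by
          simp [pvSplitNl, if_neg hnl, hs]
        rw [pvLoopA, if_neg hsp, if_neg hnl, ih, hsplit]
        have : pvSegTrans (c :: s) = [c, ' '] ++ pvSegTrans s := by
          simp [pvSegTrans, hsp]
        simp only [List.map_cons, this, pvJoinGrow_prepend, hs]
        simp

-- ===== VERDICT (by name: the statement is the Claim_ definition above) =====
theorem tree_info_string_spec : Claim_equal_tree_info_string := by
  intro s _
  show tree_info_string s = tree_info_string_alt s
  unfold tree_info_string tree_info_string_alt
  rw [pvLoopA_eq]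
  simp
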